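-- pv_equiv track=rewrite | github.com/Javier-va32/fiizbuzz_clasificador | clasificar_enteros.py | clasificar_enteros
-- ===== SOURCE A (Python) =====
-- def clasificar_enteros(numeros):
--     fizzbuzz = []
--     fizz = []
--     buzz = []
--     otro = []
--
--     for i in numeros:
--         if i%3==0  and i%5==0:
--             fizzbuzz.append(i)
--         elif i%5==0:
--             buzz.append(i)
--         elif i%3==0:
--             fizz.append(i)
--         else:
--             otro.append(i)
--     return fizzbuzz, buzz, fizz, otro
-- ===== SOURCE B (Python) =====
-- def clasificar_enteros(numeros):
--     fizzbuzz = [i for i in numeros if i % 3 == 0 and i % 5 == 0]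
--     buzz = [i for i in numeros if i % 5 == 0 and i % 3 != 0]
--     fizz = [i for i in numeros if i % 3 == 0 and i % 5 != 0]
--     otro = [i for i in numeros if i % 3 != 0 and i % 5 != 0]
--     return fizzbuzz, buzz, fizz, otro
-- ===== Notes on version B (the rewrite author's own statement) =====
-- stated objective: alternative
-- what changed: Replaces the single branching loop over four mutable accumulators by four independent filtering passes (list comprehensions), one per output list, with explicit mutually exclusive conditions encoding the elif precedence.
import Mathlib
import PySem

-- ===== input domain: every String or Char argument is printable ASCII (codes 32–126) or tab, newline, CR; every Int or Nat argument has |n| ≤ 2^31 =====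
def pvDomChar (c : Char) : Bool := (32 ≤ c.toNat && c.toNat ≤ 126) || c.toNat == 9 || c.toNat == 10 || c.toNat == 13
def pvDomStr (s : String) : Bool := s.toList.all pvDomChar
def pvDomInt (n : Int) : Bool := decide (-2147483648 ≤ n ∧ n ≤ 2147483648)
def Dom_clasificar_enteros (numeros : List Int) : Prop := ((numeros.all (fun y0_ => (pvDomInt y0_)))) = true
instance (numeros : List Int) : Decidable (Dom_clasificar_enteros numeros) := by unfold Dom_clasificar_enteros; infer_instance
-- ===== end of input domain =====

-- B replaces A's single branching loop with four independent filtering passes (alternative decomposition, same cost).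

-- ===== PORT A =====
-- A: one loop over numeros, branching elif chain, appending to four accumulators.
def clasificar_enteros (numeros : List Int) : List Int × List Int × List Int × List Int :=
  let st := numeros.foldl
    (fun (st : List Int × List Int × List Int × List Int) i =>
      let (fizzbuzz, fizz, buzz, otro) := st
      if PySem.Int.mod i 3 = 0 ∧ PySem.Int.mod i 5 = 0 then
        (fizzbuzz ++ [i], fizz, buzz, otro)
      else if PySem.Int.mod i 5 = 0 then
        (fizzbuzz, fizz, buzz ++ [i], otro)
      else if PySem.Int.mod i 3 = 0 then
        (fizzbuzz, fizz ++ [i], buzz, otro)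
      else
        (fizzbuzz, fizz, buzz, otro ++ [i]))
    ([], [], [], [])
  (st.1, st.2.2.1, st.2.1, st.2.2.2)

-- ===== PORT B =====
-- B: four independent filters with mutually exclusive conditions.
def clasificar_enteros_alt (numeros : List Int) : List Int × List Int × List Int × List Int :=
  (numeros.filter (fun i => PySem.Int.mod i 3 = 0 ∧ PySem.Int.mod i 5 = 0),
   numeros.filter (fun i => PySem.Int.mod i 5 = 0 ∧ PySem.Int.mod i 3 ≠ 0),
   numeros.filter (fun i => PySem.Int.mod i 3 = 0 ∧ PySem.Int.mod i 5 ≠ 0),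
   numeros.filter (fun i => PySem.Int.mod i 3 ≠ 0 ∧ PySem.Int.mod i 5 ≠ 0))

-- ===== PRECONDITION & SPEC =====
def Spec_clasificar_enteros (numeros : List Int) (out : List Int × List Int × List Int × List Int) : Prop := out = clasificar_enteros_alt numeros
instance (numeros : List Int) (out : List Int × List Int × List Int × List Int) : Decidable (Spec_clasificar_enteros numeros out) := by unfold Spec_clasificar_enteros; infer_instance

-- ===== CLAIM (what is proved, stated in full; the proofs are below) =====
def Claim_equal_clasificar_enteros : Prop := ∀ (numeros : List Int), Dom_clasificar_enteros numeros → Spec_clasificar_enteros numeros (clasificar_enteros numeros)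

-- ===== LEMMAS AND PROOFS =====

-- Loop invariant for A's fold: starting from arbitrary accumulators, the fold
-- appends exactly the corresponding filtered suffix to each accumulator.
theorem clasificar_foldl_inv (numeros : List Int)
    (fb fz bz ot : List Int) :
    numeros.foldl
      (fun (st : List Int × List Int × List Int × List Int) i =>
        let (fizzbuzz, fizz, buzz, otro) := st
        if PySem.Int.mod i 3 = 0 ∧ PySem.Int.mod i 5 = 0 then
          (fizzbuzz ++ [i], fizz, buzz, otro)
        else if PySem.Int.mod i 5 = 0 then
          (fizzbuzz, fizz, buzz ++ [i], otro)
        else if PySem.Int.mod i 3 = 0 then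
          (fizzbuzz, fizz ++ [i], buzz, otro)
        else
          (fizzbuzz, fizz, buzz, otro ++ [i]))
      (fb, fz, bz, ot)
    = (fb ++ numeros.filter (fun i => decide (PySem.Int.mod i 3 = 0 ∧ PySem.Int.mod i 5 = 0)),
       fz ++ numeros.filter (fun i => decide (PySem.Int.mod i 3 = 0 ∧ PySem.Int.mod i 5 ≠ 0)),
       bz ++ numeros.filter (fun i => decide (PySem.Int.mod i 5 = 0 ∧ PySem.Int.mod i 3 ≠ 0)),
       ot ++ numeros.filter (fun i => decide (PySem.Int.mod i 3 ≠ 0 ∧ PySem.Int.mod i 5 ≠ 0))) := by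
  induction numeros generalizing fb fz bz ot with
  | nil => simp
  | cons x xs ih =>
    by_cases h3 : PySem.Int.mod x 3 = 0 <;> by_cases h5 : PySem.Int.mod x 5 = 0 <;>
      simp_all [List.foldl_cons]

-- ===== VERDICT (by name: the statement is the Claim_ definition above) =====
theorem clasificar_enteros_spec : Claim_equal_clasificar_enteros := by
  intro numeros _
  unfold Spec_clasificar_enteros
  simp only [clasificar_enteros, clasificar_enteros_alt]
  rw [clasificar_foldl_inv]
  simp
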